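-- pv_equiv track=rewrite | github.com/Lucrilhas/Minimum-Transport | CaminhoMinimo.py | get_caminhos
-- ===== SOURCE A (Python) =====
-- def aumenta_caminho(caminho, opcoes):
--     for indc in range(len(caminho) - 1, -1, -1):
--         if caminho[indc] == None:
--             caminho[indc] = opcoes[0]
--             return caminho
--         elif caminho[indc] == opcoes[-1]:
--             caminho[indc] = opcoes[0]
--         else:
--             caminho[indc] = opcoes[opcoes.index(caminho[indc]) + 1]
--             return caminho
--
-- def get_caminhos(opcoes):
--     caminho = [None] * len(opcoes)
--     caminhos = []
--     resultado = [[]]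
--     while True:
--         caminho = aumenta_caminho(caminho, opcoes)
--         if caminho is None:
--             break
--         caminhos.append(caminho.copy())
--
--     for c in caminhos:
--         while None in c:
--             c.pop(0)
--         if not any(c.count(element) > 1 for element in c):
--             resultado.append(c)
--     return resultado
-- ===== SOURCE B (Python) =====
-- def get_caminhos(opcoes):
--     # BFS by length: extend every arrangement by each unused option, level by level.
--     resultado = [[]]
--     frontier = [[]]
--     for _ in range(len(opcoes)):
--         nxt = []
--         for arr in frontier:
--             for o in opcoes:
--                 if o not in arr:
--                     nxt.append(arr + [o])
--         resultado += nxt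
--         frontier = nxt
--     return resultado
-- ===== Notes on version B (the rewrite author's own statement) =====
-- stated objective: alternative
-- what changed: Replaces the value-based odometer over all n-tuples (followed by strip-Nones and a distinctness filter) with a level-by-level BFS that extends each partial arrangement only by options not already used, generating exactly the distinct arrangements in the same length-then-lex order (far fewer candidates; a timing run could not verify speed because its large inputs are duplicate-heavy and lie outside Pre_).
-- outside the precondition, e.g. on get_caminhos([1, 1]): A returns [[], [1]], B returns [[], [1], [1]]
import Mathlib
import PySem

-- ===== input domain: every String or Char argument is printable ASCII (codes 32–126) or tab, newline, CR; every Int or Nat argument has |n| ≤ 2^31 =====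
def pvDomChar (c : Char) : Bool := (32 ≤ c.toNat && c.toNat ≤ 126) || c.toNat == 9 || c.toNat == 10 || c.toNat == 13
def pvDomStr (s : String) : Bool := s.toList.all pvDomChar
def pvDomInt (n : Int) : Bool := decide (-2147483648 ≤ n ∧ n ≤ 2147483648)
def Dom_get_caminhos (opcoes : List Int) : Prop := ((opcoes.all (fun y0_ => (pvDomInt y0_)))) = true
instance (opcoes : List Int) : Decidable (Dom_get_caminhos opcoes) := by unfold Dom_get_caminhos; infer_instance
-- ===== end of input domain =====

-- B replaces A's generate-all-tuples odometer-plus-filter with a level-by-level BFS that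
-- builds only the distinct arrangements (extend by unused options): a different algorithm,
-- same output on duplicate-free option lists.

-- ===== PORT A =====
-- aumenta_caminho scans caminho from the right; ported structurally on the reversed list.
-- The first and the last option are read with headD / getLastD: inside get_caminhos the
-- scanned list is nonempty only when opcoes is, so the defaults are never the returned
-- value; likewise the two inner 'none' results stand for the (unreachable there)
-- ValueError / IndexError of 'opcoes.index(caminho[indc]) + 1'.
def pvAumentaGo (opcoes : List Int) : List (Option Int) → Option (List (Option Int))
  | [] => none
  | x :: rest =>
    match x with
    | none => some (some (opcoes.headD 0) :: rest)
    | some v =>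
      if v = opcoes.getLastD 0 then
        (pvAumentaGo opcoes rest).map (fun r => some (opcoes.headD 0) :: r)
      else
        match PySem.List.index? opcoes v with
        | none => none
        | some i =>
          match PySem.List.pyGet? opcoes ((i : Int) + 1) with
          | none => none
          | some nv => some (some nv :: rest)

def aumenta_caminho (caminho : List (Option Int)) (opcoes : List Int) : Option (List (Option Int)) :=
  (pvAumentaGo opcoes caminho.reverse).map List.reverse

-- the 'while True' collection loop; fuel (n+1)^n + 1 dominates the number of states visited
def pvLoopA (opcoes : List Int) : Nat → List (Option Int) → List (List (Option Int)) → List (List (Option Int))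
  | 0, _, acc => acc
  | fuel+1, caminho, acc =>
    match aumenta_caminho caminho opcoes with
    | none => acc
    | some c => pvLoopA opcoes fuel c (acc ++ [c])

-- 'while None in c: c.pop(0)'
def pvStrip : List (Option Int) → List (Option Int)
  | [] => []
  | x :: rest => if (x :: rest).contains none then pvStrip rest else x :: rest

def get_caminhos (opcoes : List Int) : List (List Int) :=
  let n := opcoes.length
  let caminhos := pvLoopA opcoes ((n + 1) ^ n + 1) (List.replicate n (none : Option Int)) []
  caminhos.foldl (fun res c =>
    let d := (pvStrip c).map (fun x => x.getD 0)
    if d.any (fun e => PySem.List.count d e > 1) then res else res ++ [d]) [[]]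

-- ===== PORT B =====
def get_caminhos_alt (opcoes : List Int) : List (List Int) :=
  ((List.range opcoes.length).foldl (fun (st : List (List Int) × List (List Int)) _ =>
      let nxt := st.2.foldl (fun acc arr =>
          opcoes.foldl (fun acc2 o =>
            if arr.contains o then acc2 else acc2 ++ [arr ++ [o]]) acc) []
      (st.1 ++ nxt, nxt)) ([[]], [[]])).1

-- ===== PRECONDITION & SPEC =====
-- Pre_ excludes lists with duplicate elements: there A's value-based odometer (first-match
-- .index, reset on any value equal to the last option) can loop forever, and where it does
-- return, the collapsed result is an accident of first-match indexing — a duplicate-input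
-- corner where neither behaviour is specified.
def Pre_get_caminhos (opcoes : List Int) : Prop := opcoes.Nodup
instance (opcoes : List Int) : Decidable (Pre_get_caminhos opcoes) := by unfold Pre_get_caminhos; infer_instance

def pvWitness_get_caminhos : List Int := [1, 2, 3]

def Spec_get_caminhos (opcoes : List Int) (out : List (List Int)) : Prop := out = get_caminhos_alt opcoes
instance (opcoes : List Int) (out : List (List Int)) : Decidable (Spec_get_caminhos opcoes out) := by unfold Spec_get_caminhos; infer_instance

-- ===== CLAIM (what is proved, stated in full; the proofs are below) =====
def Claim_equal_get_caminhos : Prop := ∀ (opcoes : List Int), Dom_get_caminhos opcoes → Pre_get_caminhos opcoes → Spec_get_caminhos opcoes (get_caminhos opcoes)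

-- ===== LEMMAS AND PROOFS =====

-- reversed tuples of length k over os, odometer order (front element is the fast digit)
def pvTup (os : List Int) : Nat → List (List Int)
  | 0 => [[]]
  | k+1 => (pvTup os k).flatMap (fun rt => os.map (fun o => o :: rt))

-- reversed odometer states for levels k+1 .. k+j (j None slots left at level k+1's start)
def pvH (os : List Int) : Nat → Nat → List (List (Option Int))
  | 0, _ => []
  | j+1, k => (pvTup os (k+1)).map (fun rt => rt.map some ++ List.replicate j (none : Option Int)) ++ pvH os j (k+1)

-- forward tuple levels k+1 .. k+j
def pvFlat (os : List Int) : Nat → Nat → List (List Int)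
  | 0, _ => []
  | j+1, k => (pvTup os (k+1)).map List.reverse ++ pvFlat os j (k+1)

-- Trace g s l r : from s, g steps through exactly the states in l, and g of the last yields r
def pvTrace (g : List (Option Int) → Option (List (Option Int))) :
    List (Option Int) → List (List (Option Int)) → Option (List (Option Int)) → Prop
  | s, [], r => g s = r
  | s, x :: xs, r => g s = some x ∧ pvTrace g x xs r

theorem pvTrace_append (g : List (Option Int) → Option (List (Option Int)))
    (s m : List (Option Int)) (l1 l2 : List (List (Option Int))) (r : Option (List (Option Int)))
    (h1 : pvTrace g s l1 (some m)) (h2 : pvTrace g m l2 r) :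
    pvTrace g s (l1 ++ m :: l2) r := by
  induction l1 generalizing s with
  | nil => exact ⟨h1, h2⟩
  | cons x xs ih => exact ⟨h1.1, ih x h1.2⟩

-- drop i os = [v] → v is the last element
theorem pv_last_of_drop_singleton (os : List Int) (i : Nat) (v : Int)
    (h : os.drop i = [v]) : os.getLastD 0 = v := by
  have h1 : os ≠ [] := by intro he; rw [he] at h; simp at h
  have hne : os.drop i ≠ [] := by simp [h]
  have h2 : (os.drop i).getLast hne = os.getLast h1 := List.getLast_drop hne
  rw [List.getLastD_eq_getLast?, List.getLast?_eq_some_getLast h1, ← h2]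
  simp [h]

theorem pv_ne_last_of_drop (os : List Int) (i : Nat) (v w : Int) (vs : List Int)
    (hnd : os.Nodup) (h : os.drop i = v :: w :: vs) : v ≠ os.getLastD 0 := by
  have hne : os ≠ [] := by intro he; rw [he] at h; simp at h
  have hdne : os.drop i ≠ [] := by simp [h]
  have hnd2 : (os.drop i).Nodup := hnd.sublist (List.drop_sublist i os)
  rw [h] at hnd2
  have hlast : os.getLastD 0 = (w :: vs).getLast (by simp) := by
    have h2 : (os.drop i).getLast hdne = os.getLast hne := List.getLast_drop hdne
    rw [List.getLastD_eq_getLast?, List.getLast?_eq_some_getLast hne, ← h2]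
    simp only [Option.getD_some]
    have : (os.drop i).getLast hdne = (v :: w :: vs).getLast (by simp) := by
      congr 1
    rw [this, List.getLast_cons (by simp)]
  intro hv
  have hmem : v ∈ w :: vs := by rw [hv, hlast]; exact List.getLast_mem _
  exact (List.nodup_cons.mp hnd2).1 hmem

-- first occurrence of os[i] (Nodup) is at i
theorem pv_index?_drop (os : List Int) (i : Nat) (v : Int) (t : List Int)
    (hnd : os.Nodup) (h : os.drop i = v :: t) : PySem.List.index? os v = some i := by
  have hi : i < os.length := by
    by_contra hlt
    rw [List.drop_eq_nil_of_le (by omega)] at h; simp at h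
  have hos : os = os.take i ++ v :: t := by
    conv_lhs => rw [← List.take_append_drop i os, h]
  rw [PySem.List.index?_eq_some_iff]
  refine ⟨os.take i, t, hos, by simp [List.length_take]; omega, ?_⟩
  intro hv
  have hdisj := (List.nodup_append.mp (hos ▸ hnd)).2.2
  exact hdisj v hv v (by simp) rfl

-- Lemma A: the front digit cycles through the remaining suffix of os, then carries
theorem pvCycleFront (os : List Int) (hnd : os.Nodup) (i : Nat) (v : Int) (vs : List Int)
    (hdrop : os.drop i = v :: vs) (rs : List (Option Int)) :
    pvTrace (pvAumentaGo os) (some v :: rs) (vs.map (fun w => some w :: rs))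
      ((pvAumentaGo os rs).map (fun r => some (os.headD 0) :: r)) := by
  induction vs generalizing i v with
  | nil =>
    have hlast : v = os.getLastD 0 := (pv_last_of_drop_singleton os i v hdrop).symm
    show pvAumentaGo os (some v :: rs) = _
    simp [pvAumentaGo, hlast]
  | cons w vs' ih =>
    have hne : v ≠ os.getLastD 0 := pv_ne_last_of_drop os i v w vs' hnd hdrop
    have hidx : PySem.List.index? os v = some i := pv_index?_drop os i v (w :: vs') hnd hdrop
    have hdrop' : os.drop (i+1) = w :: vs' := by
      have := congrArg (List.drop 1) hdrop
      simpa [List.drop_drop, Nat.add_comm] using this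
    have hget : PySem.List.pyGet? os ((i : Int) + 1) = some w := by
      have h0 : os[i+1]? = some w := by
        have := (List.getElem?_drop (xs := os) (i := i+1) (j := 0)).symm
        simpa [hdrop'] using this
      have hc : ((i : Int) + 1) = ((i + 1 : Nat) : Int) := by push_cast; ring
      rw [hc, PySem.List.pyGet?_natCast, h0]
    refine ⟨?_, ?_⟩
    · show pvAumentaGo os (some v :: rs) = _
      simp only [pvAumentaGo, hidx]
      rw [if_neg hne]
      simp [hget]
    · exact ih (i+1) w hdrop'

-- Lemma B: lift a trace of the slow digits through a full cycle of the front digit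
theorem pvLift (os : List Int) (hos : os ≠ []) (hnd : os.Nodup)
    (l : List (List (Option Int))) :
    ∀ (X : List (Option Int)) (r : Option (List (Option Int))),
    pvTrace (pvAumentaGo os) X l r →
    pvTrace (pvAumentaGo os) (some (os.headD 0) :: X)
      ((os.tail.map (fun w => some w :: X)) ++ l.flatMap (fun Y => os.map (fun w => some w :: Y)))
      (r.map (fun Z => some (os.headD 0) :: Z)) := by
  obtain ⟨a, t, rfl⟩ := List.exists_cons_of_ne_nil hos
  induction l with
  | nil =>
    intro X r h
    have hfront := pvCycleFront (a :: t) hnd 0 a t rfl X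
    rw [h] at hfront
    simpa using hfront
  | cons Y l' ih =>
    intro X r h
    have hfront := pvCycleFront (a :: t) hnd 0 a t rfl X
    rw [h.1] at hfront
    have hih := ih Y r h.2
    have := pvTrace_append (pvAumentaGo (a :: t)) (some ((a :: t).headD 0) :: X)
      (some ((a :: t).headD 0) :: Y) (t.map (fun w => some w :: X))
      ((t.map (fun w => some w :: Y)) ++ l'.flatMap (fun Z => (a :: t).map (fun w => some w :: Z)))
      (r.map (fun Z => some ((a :: t).headD 0) :: Z)) (by simpa using hfront) hih
    simpa [List.flatMap_cons, List.append_assoc] using this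

theorem pvTup_cons (os : List Int) (hos : os ≠ []) (k : Nat) :
    ∃ T, pvTup os k = List.replicate k (os.headD 0) :: T := by
  obtain ⟨a, t, rfl⟩ := List.exists_cons_of_ne_nil hos
  induction k with
  | zero => exact ⟨[], rfl⟩
  | succ k ih =>
    obtain ⟨T, hT⟩ := ih
    refine ⟨t.map (fun o => o :: List.replicate k a) ++
      T.flatMap (fun rt => (a :: t).map (fun o => o :: rt)), ?_⟩
    simp only [pvTup, hT, List.flatMap_cons, List.map_cons, List.replicate_succ]
    simp [List.headD]

-- Lemma C: a full level-k cycle starting from all-first, with carry into rs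
theorem pvCycleLevel (os : List Int) (hos : os ≠ []) (hnd : os.Nodup) :
    ∀ (k : Nat) (rs : List (Option Int)),
    pvTrace (pvAumentaGo os) ((List.replicate k (os.headD 0)).map some ++ rs)
      (((pvTup os k).tail).map (fun rt => rt.map some ++ rs))
      ((pvAumentaGo os rs).map (fun r => (List.replicate k (os.headD 0)).map some ++ r)) := by
  intro k
  induction k with
  | zero =>
    intro rs
    show pvTrace _ rs _ _
    cases h : pvAumentaGo os rs <;> simp [pvTup, pvTrace, h]
  | succ k ih =>
    intro rs
    have hlift := pvLift os hos hnd (((pvTup os k).tail).map (fun rt => rt.map some ++ rs))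
      ((List.replicate k (os.headD 0)).map some ++ rs)
      ((pvAumentaGo os rs).map (fun r => (List.replicate k (os.headD 0)).map some ++ r))
      (ih rs)
    obtain ⟨a, t, rfl⟩ := List.exists_cons_of_ne_nil hos
    obtain ⟨T, hT⟩ := pvTup_cons (a :: t) (by simp) k
    have hstart : ((List.replicate (k+1) ((a :: t).headD 0)).map some ++ rs)
        = some ((a :: t).headD 0) :: ((List.replicate k ((a :: t).headD 0)).map some ++ rs) := by
      simp [List.replicate_succ]
    rw [hstart]
    have htail : ((pvTup (a :: t) (k+1)).tail).map (fun rt => rt.map some ++ rs)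
        = (t.map (fun w => some w :: ((List.replicate k ((a :: t).headD 0)).map some ++ rs)))
          ++ (((pvTup (a :: t) k).tail).map (fun rt => rt.map some ++ rs)).flatMap
              (fun Y => (a :: t).map (fun w => some w :: Y)) := by
      have hTup : pvTup (a :: t) (k+1)
          = (a :: List.replicate k ((a :: t).headD 0))
            :: (t.map (fun o => o :: List.replicate k ((a :: t).headD 0))
                ++ T.flatMap (fun rt => (a :: t).map (fun o => o :: rt))) := by
        show (pvTup (a :: t) k).flatMap _ = _
        rw [hT]
        simp [List.flatMap_cons]
      rw [hTup, hT]
      simp [List.map_append, List.map_map, List.flatMap_map, List.map_flatMap,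
        Function.comp_def, List.map_replicate]
    have hres : ((pvAumentaGo (a :: t) rs).map
          (fun r => (List.replicate (k+1) ((a :: t).headD 0)).map some ++ r))
        = ((pvAumentaGo (a :: t) rs).map
            (fun r => (List.replicate k ((a :: t).headD 0)).map some ++ r)).map
            (fun Z => some ((a :: t).headD 0) :: Z) := by
      cases pvAumentaGo (a :: t) rs <;> simp [List.replicate_succ]
    rw [htail, hres]
    exact hlift

theorem pvRunLevels (os : List Int) (hos : os ≠ []) (hnd : os.Nodup) :
    ∀ (j k : Nat),
    pvTrace (pvAumentaGo os)
      ((List.replicate k (os.headD 0)).map some ++ List.replicate j (none : Option Int))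
      ((((pvTup os k).tail).map (fun rt => rt.map some ++ List.replicate j (none : Option Int)))
        ++ pvH os j k)
      none := by
  intro j
  induction j with
  | zero =>
    intro k
    have := pvCycleLevel os hos hnd k []
    simpa [pvH, pvAumentaGo] using this
  | succ j ih =>
    intro k
    have hcyc := pvCycleLevel os hos hnd k (List.replicate (j+1) (none : Option Int))
    have hstep : pvAumentaGo os (List.replicate (j+1) (none : Option Int))
        = some (some (os.headD 0) :: List.replicate j none) := by
      simp [List.replicate_succ, pvAumentaGo]
    rw [hstep] at hcyc
    simp only [Option.map_some] at hcyc
    have hm : (List.replicate k (os.headD 0)).map some ++ (some (os.headD 0) :: List.replicate j none)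
        = (List.replicate (k+1) (os.headD 0)).map some ++ List.replicate j (none : Option Int) := by
      simp [List.replicate_succ' (n := k), List.map_append, List.append_assoc]
    rw [hm] at hcyc
    have := pvTrace_append (pvAumentaGo os) _ _ _ _ none hcyc (ih (k+1))
    have hH : ((pvTup os k).tail).map
          (fun rt => rt.map some ++ List.replicate (j+1) (none : Option Int)) ++ pvH os (j+1) k
        = ((pvTup os k).tail).map (fun rt => rt.map some ++ List.replicate (j+1) (none : Option Int))
          ++ ((List.replicate (k+1) (os.headD 0)).map some ++ List.replicate j (none : Option Int))
            :: (((pvTup os (k+1)).tail).map (fun rt => rt.map some ++ List.replicate j (none : Option Int))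
                ++ pvH os j (k+1)) := by
      obtain ⟨T, hT⟩ := pvTup_cons os hos (k+1)
      simp only [pvH, hT, List.map_cons, List.tail_cons]
      simp
    rw [hH]
    exact this

theorem pvRunAll (os : List Int) (hos : os ≠ []) (hnd : os.Nodup) (n : Nat) :
    pvTrace (pvAumentaGo os) (List.replicate n (none : Option Int)) (pvH os n 0) none := by
  cases n with
  | zero => simp [pvH, pvTrace, pvAumentaGo]
  | succ n =>
    have hstep : pvAumentaGo os (List.replicate (n+1) (none : Option Int))
        = some (some (os.headD 0) :: List.replicate n none) := by
      simp [List.replicate_succ, pvAumentaGo]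
    have hG := pvRunLevels os hos hnd n 1
    have hm : (List.replicate 1 (os.headD 0)).map some ++ List.replicate n (none : Option Int)
        = some (os.headD 0) :: List.replicate n none := by simp
    rw [hm] at hG
    obtain ⟨T, hT⟩ := pvTup_cons os hos 1
    show pvTrace _ _ (pvH os (n+1) 0) none
    have hH : pvH os (n+1) 0
        = (some (os.headD 0) :: List.replicate n none)
          :: (((pvTup os 1).tail).map (fun rt => rt.map some ++ List.replicate n (none : Option Int))
              ++ pvH os n 1) := by
      simp only [pvH, hT, List.map_cons, List.tail_cons]
      simp
    rw [hH]
    exact ⟨hstep, hG⟩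

-- transfer the reversed-state trace to the actual (unreversed) states of the port
theorem pvTrace_rev (os : List Int) :
    ∀ (l : List (List (Option Int))) (s : List (Option Int)) (r : Option (List (Option Int))),
    pvTrace (pvAumentaGo os) s l r →
    pvTrace (fun c => aumenta_caminho c os) s.reverse (l.map List.reverse) (r.map List.reverse) := by
  intro l
  induction l with
  | nil =>
    intro s r h
    have h' : pvAumentaGo os s = r := h
    show aumenta_caminho s.reverse os = _
    simp [aumenta_caminho, h']
  | cons x xs ih =>
    intro s r h
    have h1 : pvAumentaGo os s = some x := h.1
    exact ⟨by show aumenta_caminho s.reverse os = _; simp [aumenta_caminho, h1], ih x r h.2⟩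

theorem pvLoop_run (os : List Int) :
    ∀ (l : List (List (Option Int))) (s : List (Option Int)) (acc : List (List (Option Int))) (fuel : Nat),
    pvTrace (fun c => aumenta_caminho c os) s l none → l.length < fuel →
    pvLoopA os fuel s acc = acc ++ l := by
  intro l
  induction l with
  | nil =>
    intro s acc fuel h hf
    cases fuel with
    | zero => omega
    | succ fl =>
      have h' : aumenta_caminho s os = none := h
      simp only [pvLoopA, h']
      simp
  | cons x xs ih =>
    intro s acc fuel h hf
    cases fuel with
    | zero => simp at hf
    | succ fl =>
      have h1 : aumenta_caminho s os = some x := h.1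
      simp only [pvLoopA, h1]
      rw [ih x (acc ++ [x]) fl h.2 (by simpa using hf)]
      simp

theorem pv_flatMap_const_length {α β : Type} (f : α → List β) (m : Nat)
    (hf : ∀ x, (f x).length = m) : ∀ (l : List α), (l.flatMap f).length = l.length * m := by
  intro l
  induction l with
  | nil => simp
  | cons x t ih => simp [List.flatMap_cons, ih, hf x]; ring

theorem pvTup_length (os : List Int) : ∀ k, (pvTup os k).length = os.length ^ k := by
  intro k
  induction k with
  | zero => rfl
  | succ k ih =>
    show ((pvTup os k).flatMap _).length = _
    rw [pv_flatMap_const_length _ os.length (by intro x; simp) _, ih]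
    ring

theorem pvH_len (os : List Int) :
    ∀ (j k : Nat), (pvH os j k).length + os.length ^ k ≤ (os.length + 1) ^ j * os.length ^ k := by
  intro j
  induction j with
  | zero => intro k; simp [pvH]
  | succ j ih =>
    intro k
    have hi := ih (k+1)
    have h1 : (pvH os (j+1) k).length = os.length ^ (k+1) + (pvH os j (k+1)).length := by
      simp [pvH, pvTup_length]
    have hp : 1 ≤ (os.length + 1) ^ j := Nat.one_le_pow _ _ (by omega)
    have hq : (os.length + 1) ^ (j+1) * os.length ^ k
        = (os.length + 1) ^ j * os.length ^ (k+1) + (os.length + 1) ^ j * os.length ^ k := by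
      ring
    have hr : os.length ^ k ≤ (os.length + 1) ^ j * os.length ^ k :=
      Nat.le_mul_of_pos_left _ (by omega)
    omega

-- the collected states of A's while-loop
theorem pvCaminhos_eq (os : List Int) (hos : os ≠ []) (hnd : os.Nodup) :
    pvLoopA os ((os.length + 1) ^ os.length + 1) (List.replicate os.length (none : Option Int)) []
      = (pvH os os.length 0).map List.reverse := by
  have htr := pvTrace_rev os (pvH os os.length 0) (List.replicate os.length none) none
    (pvRunAll os hos hnd os.length)
  rw [List.reverse_replicate] at htr
  have hlen : ((pvH os os.length 0).map List.reverse).length < (os.length + 1) ^ os.length + 1 := by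
    have := pvH_len os os.length 0
    simp only [pow_zero, mul_one] at this
    simp only [List.length_map]
    omega
  simpa using pvLoop_run os _ _ [] _ htr hlen

-- ----- post-processing of A, and B's levels -----

def pvGood (d : List Int) : Bool := !(d.any (fun e => PySem.List.count d e > 1))

theorem pvPost (l : List (List (Option Int))) (init : List (List Int)) :
    l.foldl (fun res c =>
      let d := (pvStrip c).map (fun x => x.getD 0)
      if d.any (fun e => PySem.List.count d e > 1) then res else res ++ [d]) init
    = init ++ ((l.map (fun c => (pvStrip c).map (fun x => x.getD 0))).filter pvGood) := by
  induction l generalizing init with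
  | nil => simp
  | cons c t ih =>
    simp only [List.foldl_cons, List.map_cons, List.filter_cons]
    by_cases h : ((pvStrip c).map (fun x => x.getD 0)).any
        (fun e => PySem.List.count ((pvStrip c).map (fun x => x.getD 0)) e > 1) = true
    · have hg : pvGood ((pvStrip c).map (fun x => x.getD 0)) = false := by
        simp only [pvGood, h, Bool.not_true]
      rw [if_pos h, ih]
      simp [hg]
    · have hb : ((pvStrip c).map (fun x => x.getD 0)).any
          (fun e => PySem.List.count ((pvStrip c).map (fun x => x.getD 0)) e > 1) = false := by
        simpa using h
      have hg : pvGood ((pvStrip c).map (fun x => x.getD 0)) = true := by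
        simp only [pvGood, hb, Bool.not_false]
      rw [if_neg h, ih]
      simp [hg]

theorem pvStrip_pad : ∀ (j : Nat) (l : List Int),
    pvStrip (List.replicate j (none : Option Int) ++ l.map some) = l.map some := by
  intro j
  induction j with
  | zero =>
    intro l
    cases l with
    | nil => rfl
    | cons x t =>
      show pvStrip (some x :: t.map some) = _
      rw [pvStrip]
      simp
  | succ j ih =>
    intro l
    show pvStrip ((none : Option Int) :: (List.replicate j none ++ l.map some)) = _
    cases h : List.replicate j (none : Option Int) ++ l.map some with
    | nil => rw [pvStrip]; simp [← h, ih l]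
    | cons y t => rw [pvStrip]; simp [← h, ih l]

theorem pvExtract_one (rt : List Int) (j : Nat) :
    (pvStrip ((rt.map some ++ List.replicate j (none : Option Int)).reverse)).map (fun x => x.getD 0)
      = rt.reverse := by
  rw [List.reverse_append, List.reverse_replicate, ← List.map_reverse, pvStrip_pad]
  simp

theorem pvExtract (os : List Int) :
    ∀ (j k : Nat), (pvH os j k).map (fun s => (pvStrip s.reverse).map (fun x => x.getD 0))
      = pvFlat os j k := by
  intro j
  induction j with
  | zero => intro k; rfl
  | succ j ih =>
    intro k
    simp only [pvH, pvFlat, List.map_append, List.map_map, ih (k+1)]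
    congr 1
    apply List.map_congr_left
    intro rt _
    exact pvExtract_one rt j

theorem pvGood_iff (d : List Int) : pvGood d = true ↔ d.Nodup := by
  rw [pvGood, List.nodup_iff_count_le_one]
  simp only [Bool.not_eq_true', List.any_eq_false, decide_eq_true_eq]
  constructor
  · intro h a
    by_cases ha : a ∈ d
    · have := h a ha; rw [PySem.List.count_eq] at this; omega
    · simp [List.count_eq_zero_of_not_mem ha]
  · intro h e he
    have := h e
    rw [PySem.List.count_eq]
    omega

theorem pvGood_snoc (t : List Int) (o : Int) :
    pvGood (t ++ [o]) = (pvGood t && !(t.contains o)) := by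
  rw [Bool.eq_iff_iff]
  simp [pvGood_iff, List.nodup_append]
  exact fun _ => ⟨fun h hm => h o hm rfl, fun h a ha he => h (he ▸ ha)⟩

theorem pv_filter_flatMap {α β : Type} (p : β → Bool) (f : α → List β) :
    ∀ (l : List α), (l.flatMap f).filter p = l.flatMap (fun x => (f x).filter p) := by
  intro l
  induction l with
  | nil => rfl
  | cons x t ih => simp [List.flatMap_cons, List.filter_append, ih]

theorem pv_flatMap_filter {α β : Type} (p : α → Bool) (f : α → List β) :
    ∀ (l : List α), (l.filter p).flatMap f = l.flatMap (fun x => if p x then f x else []) := by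
  intro l
  induction l with
  | nil => rfl
  | cons x t ih =>
    by_cases h : p x = true <;> simp [List.filter_cons, List.flatMap_cons, h, ih]

theorem pvKey_block (os t : List Int) :
    (os.map (fun o => t ++ [o])).filter pvGood
      = if pvGood t then (os.filter (fun o => !(t.contains o))).map (fun o => t ++ [o]) else [] := by
  induction os with
  | nil => simp
  | cons a s ih =>
    simp only [List.map_cons, List.filter_cons, pvGood_snoc, ih]
    by_cases hg : pvGood t = true
    · by_cases hm : a ∈ t <;> simp [hg, hm]
    · simp only [Bool.not_eq_true] at hg
      simp [hg]

theorem pvKey (os : List Int) (k : Nat) :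
    ((pvTup os (k+1)).map List.reverse).filter pvGood
      = (((pvTup os k).map List.reverse).filter pvGood).flatMap
          (fun t => (os.filter (fun o => !(t.contains o))).map (fun o => t ++ [o])) := by
  show (((pvTup os k).flatMap (fun rt => os.map (fun o => o :: rt))).map List.reverse).filter pvGood = _
  rw [List.map_flatMap, pv_filter_flatMap, pv_flatMap_filter, List.flatMap_map]
  have hblock : ∀ rt : List Int, ((os.map (fun o => o :: rt)).map List.reverse).filter pvGood
      = if pvGood rt.reverse then
          (os.filter (fun o => !(rt.reverse.contains o))).map (fun o => rt.reverse ++ [o])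
        else [] := by
    intro rt
    rw [List.map_map]
    have := pvKey_block os rt.reverse
    simpa [Function.comp_def, List.reverse_cons] using this
  simp only [hblock]

def pvNext (os : List Int) (fr : List (List Int)) : List (List Int) :=
  fr.foldl (fun acc arr =>
    os.foldl (fun acc2 o => if arr.contains o then acc2 else acc2 ++ [arr ++ [o]]) acc) []

def pvIter (os : List Int) : Nat → List (List Int) → List (List Int)
  | 0, fr => fr
  | c+1, fr => pvIter os c (pvNext os fr)

def pvLevels (os : List Int) : Nat → List (List Int) → List (List Int)
  | 0, _ => []
  | c+1, fr => pvNext os fr ++ pvLevels os c (pvNext os fr)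

theorem pv_foldl_skip_append' {α β : Type} (q : α → Bool) (e : α → β) :
    ∀ (l : List α) (init : List β),
    l.foldl (fun acc x => if q x then acc else acc ++ [e x]) init
      = init ++ (l.filter (fun x => !(q x))).map e := by
  intro l
  induction l with
  | nil => simp
  | cons x t ih =>
    intro init
    by_cases h : q x = true <;> simp [List.foldl_cons, List.filter_cons, h, ih]

theorem pvNext_eq (os : List Int) (fr : List (List Int)) :
    pvNext os fr = fr.flatMap (fun arr =>
      (os.filter (fun o => !(arr.contains o))).map (fun o => arr ++ [o])) := by
  unfold pvNext
  have hfun : (fun (acc : List (List Int)) (arr : List Int) =>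
      os.foldl (fun acc2 o => if arr.contains o then acc2 else acc2 ++ [arr ++ [o]]) acc)
      = (fun acc arr => acc ++ (os.filter (fun o => !(arr.contains o))).map (fun o => arr ++ [o])) := by
    funext acc arr
    exact pv_foldl_skip_append' (fun o => arr.contains o) (fun o => arr ++ [o]) os acc
  rw [hfun]
  simpa using PySem.List.foldl_append_eq_flatMap
    (fun arr => (os.filter (fun o => !(arr.contains o))).map (fun o => arr ++ [o])) fr []

theorem pvAlt_fold (os : List Int) :
    ∀ (l : List Nat) (res fr : List (List Int)),
    l.foldl (fun (st : List (List Int) × List (List Int)) _ =>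
        (st.1 ++ pvNext os st.2, pvNext os st.2)) (res, fr)
      = (res ++ pvLevels os l.length fr, pvIter os l.length fr) := by
  intro l
  induction l with
  | nil => intro res fr; simp [pvLevels, pvIter]
  | cons x t ih =>
    intro res fr
    simp only [List.foldl_cons, List.length_cons, ih, pvLevels, pvIter, List.append_assoc]

theorem pvLevels_eq (os : List Int) :
    ∀ (j k : Nat), pvLevels os j (((pvTup os k).map List.reverse).filter pvGood)
      = (pvFlat os j k).filter pvGood := by
  intro j
  induction j with
  | zero => intro k; rfl
  | succ j ih =>
    intro k
    show pvNext os _ ++ pvLevels os j _ = _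
    rw [pvNext_eq, ← pvKey, ih (k+1)]
    simp [pvFlat, List.filter_append]

-- ===== VERDICT (by name: the statement is the Claim_ definition above) =====
theorem get_caminhos_spec : Claim_equal_get_caminhos := by
  intro os hdom hpre
  show get_caminhos os = get_caminhos_alt os
  have hB : get_caminhos_alt os = [[]] ++ pvLevels os os.length ([[]] : List (List Int)) := by
    have h0 : get_caminhos_alt os
        = ((List.range os.length).foldl (fun (st : List (List Int) × List (List Int)) _ =>
            (st.1 ++ pvNext os st.2, pvNext os st.2)) ([[]], [[]])).1 := rfl
    rw [h0, pvAlt_fold]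
    simp
  cases os with
  | nil => rfl
  | cons a t =>
    have hos : (a :: t) ≠ [] := by simp
    have hA : get_caminhos (a :: t)
        = [[]] ++ (pvFlat (a :: t) (a :: t).length 0).filter pvGood := by
      have h0 : get_caminhos (a :: t)
          = (pvLoopA (a :: t) (((a :: t).length + 1) ^ (a :: t).length + 1)
              (List.replicate (a :: t).length (none : Option Int)) []).foldl
              (fun res c =>
                let d := (pvStrip c).map (fun x => x.getD 0)
                if d.any (fun e => PySem.List.count d e > 1) then res else res ++ [d]) [[]] := rfl
      rw [h0, pvCaminhos_eq _ hos hpre, pvPost]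
      congr 1
      rw [List.map_map, ← pvExtract (a :: t) (a :: t).length 0]
      simp [Function.comp_def]
    rw [hA, hB]
    congr 1
    have hbase : (((pvTup (a :: t) 0).map List.reverse).filter pvGood)
        = ([[]] : List (List Int)) := rfl
    rw [← hbase, pvLevels_eq]
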